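-- pv_equiv track=rewrite | github.com/sguberman/advent2019 | day01.py | fuel_required
-- ===== SOURCE A (Python) =====
-- def fuel_required(mass: int, include_fuel_mass: bool = False) -> int:
--     fuel_for_mass = (mass // 3) - 2
--     if fuel_for_mass < 0:
--         return 0
--     elif include_fuel_mass:
--         return fuel_for_mass + fuel_required(fuel_for_mass, True)
--     else:
--         return fuel_for_mass
-- ===== SOURCE B (Python) =====
-- def fuel_required(mass: int, include_fuel_mass: bool = False) -> int:
--     f = mass // 3 - 2
--     if f < 0:
--         return 0
--     if not include_fuel_mass:
--         return f
--     total = 0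
--     while f >= 0:
--         total += f
--         f = f // 3 - 2
--     return total
-- ===== Notes on version B (the rewrite author's own statement) =====
-- stated objective: alternative
-- what changed: Replaced A's self-recursive accumulation (f + fuel_required(f, True)) with an explicit iterative while loop threading a running total over successive fuel values.
import Mathlib
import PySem

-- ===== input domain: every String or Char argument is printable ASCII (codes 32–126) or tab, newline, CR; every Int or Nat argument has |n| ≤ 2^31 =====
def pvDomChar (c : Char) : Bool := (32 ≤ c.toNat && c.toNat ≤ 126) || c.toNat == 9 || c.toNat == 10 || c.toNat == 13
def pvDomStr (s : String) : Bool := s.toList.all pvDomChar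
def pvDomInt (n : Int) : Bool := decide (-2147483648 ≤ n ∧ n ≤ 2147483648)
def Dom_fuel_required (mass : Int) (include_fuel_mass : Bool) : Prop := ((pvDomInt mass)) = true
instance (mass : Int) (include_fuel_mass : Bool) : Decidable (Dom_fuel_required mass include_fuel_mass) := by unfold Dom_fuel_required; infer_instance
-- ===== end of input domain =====

-- B replaces A's self-recursion with an explicit while loop carrying a running total (alternative decomposition, same cost).


-- ===== PORT A =====
-- literal port of A's recursion: fuel for mass, plus (if flagged) the fuel's own fuel recursively
def fuel_required (mass : Int) (include_fuel_mass : Bool) : Int :=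
  let fuel_for_mass := PySem.Int.floordiv mass 3 - 2
  if fuel_for_mass < 0 then 0
  else if include_fuel_mass then fuel_for_mass + fuel_required fuel_for_mass true
  else fuel_for_mass
termination_by (mass + 3).toNat
decreasing_by
  rename_i h _
  have e : PySem.Int.floordiv mass 3 = mass / 3 :=
    PySem.Int.floordiv_eq_ediv_of_pos (by omega)
  simp only [e] at h ⊢
  omega

-- ===== PORT B =====
-- the while loop of Source B: while f >= 0: total += f; f = f//3 - 2
def fuelLoop (f : Int) (total : Int) : Int :=
  if f ≥ 0 then fuelLoop (PySem.Int.floordiv f 3 - 2) (total + f)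
  else total
termination_by (f + 3).toNat
decreasing_by
  rename_i h
  have e : PySem.Int.floordiv f 3 = f / 3 :=
    PySem.Int.floordiv_eq_ediv_of_pos (by omega)
  simp only [e]
  omega

def fuel_required_alt (mass : Int) (include_fuel_mass : Bool) : Int :=
  let f := PySem.Int.floordiv mass 3 - 2
  if f < 0 then 0
  else if ¬ include_fuel_mass then f
  else fuelLoop f 0

-- ===== PRECONDITION & SPEC =====
def Spec_fuel_required (mass : Int) (include_fuel_mass : Bool) (out : Int) : Prop := out = fuel_required_alt mass include_fuel_mass
instance (mass : Int) (include_fuel_mass : Bool) (out : Int) : Decidable (Spec_fuel_required mass include_fuel_mass out) := by unfold Spec_fuel_required; infer_instance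

-- ===== CLAIM (what is proved, stated in full; the proofs are below) =====
def Claim_equal_fuel_required : Prop := ∀ (mass : Int) (include_fuel_mass : Bool), Dom_fuel_required mass include_fuel_mass → Spec_fuel_required mass include_fuel_mass (fuel_required mass include_fuel_mass)

-- ===== LEMMAS AND PROOFS =====

-- the loop computes total plus A's recursive tally over f (guarded form of fuel_required · true)
theorem fuelLoop_eq (f total : Int) :
    fuelLoop f total = total + (if f < 0 then 0 else f + fuel_required f true) := by
  fun_induction fuelLoop f total with
  | case1 f total h ih =>
      rw [ih]
      conv_rhs => rw [fuel_required]
      simp only [show ¬ f < 0 by omega, if_false]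
      ring_nf
      simp only [if_true]
  | case2 f total h =>
      simp only [show f < 0 by omega, if_true]
      ring

-- ===== VERDICT (by name: the statement is the Claim_ definition above) =====
theorem fuel_required_spec : Claim_equal_fuel_required := by
  intro mass include_fuel_mass _
  show fuel_required mass include_fuel_mass = fuel_required_alt mass include_fuel_mass
  rw [fuel_required, fuel_required_alt]
  set f := PySem.Int.floordiv mass 3 - 2 with hf
  by_cases h : f < 0
  · simp [h]
  · cases include_fuel_mass with
    | false => simp [h]
    | true =>
        simp only [h, if_false]
        rw [fuelLoop_eq]
        simp [h]
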